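-- pv_equiv track=rewrite | github.com/mamoudmatook/codility_solutions | TimeComplexity/tape_equilibrium.py | solution
-- ===== SOURCE A (Python) =====
-- def solution(A):
--     N = len(A)
--     l_sum = A[0]
--     r_sum = sum(A) - l_sum
--     diff = abs(l_sum - r_sum)
--     for i in range(1, N -1):
--         l_sum += A[i]
--         r_sum -= A[i]
--         c_diff = abs(l_sum - r_sum)
--         if diff > c_diff:
--             diff = c_diff
--     return diff
-- ===== SOURCE B (Python) =====
-- def solution(A):
--     total = sum(A)
--     prefixes = []
--     s = 0
--     for x in A[:-1]:
--         s += x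
--         prefixes.append(s)
--     prefixes.sort()
--     # binary search for the leftmost prefix p with 2*p >= total
--     lo, hi = 0, len(prefixes)
--     while lo < hi:
--         mid = (lo + hi) // 2
--         if 2 * prefixes[mid] < total:
--             lo = mid + 1
--         else:
--             hi = mid
--     candidates = prefixes[max(lo - 1, 0):lo + 1]
--     return min(abs(2 * p - total) for p in candidates)
-- ===== Notes on version B (the rewrite author's own statement) =====
-- stated objective: alternative
-- what changed: B sorts the prefix-sum table of A[:-1] and binary-searches it for the prefix closest to total/2 (checking the two neighbours of the insertion point), instead of A's single pass with dual running sums and a running minimum; Pre_ excludes lists with fewer than two elements, where no real split exists: A returns the accidental unconditional-first-split value abs(A[0]) on a singleton (and raises IndexError on []), while B's min over the empty candidate set raises ValueError.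
-- outside the precondition, e.g. on solution([5]): A returns 5, B raises ValueError; on solution([0]): A returns 0, B raises ValueError; on solution([]): A raises IndexError, B raises ValueError
import Mathlib
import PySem

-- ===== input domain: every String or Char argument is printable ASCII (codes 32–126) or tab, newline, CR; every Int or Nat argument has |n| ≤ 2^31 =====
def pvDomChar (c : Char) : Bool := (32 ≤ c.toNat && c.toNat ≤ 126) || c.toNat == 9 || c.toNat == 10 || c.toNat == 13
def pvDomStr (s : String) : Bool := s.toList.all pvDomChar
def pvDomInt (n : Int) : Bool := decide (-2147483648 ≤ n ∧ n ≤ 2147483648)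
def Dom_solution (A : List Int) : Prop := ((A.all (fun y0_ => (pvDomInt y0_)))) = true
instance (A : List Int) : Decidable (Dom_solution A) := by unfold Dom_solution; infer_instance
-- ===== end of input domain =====

-- B sorts the prefix sums of A[:-1] and binary-searches for the prefix closest to total/2,
-- replacing A's running-sums/running-minimum pass (objective: alternative algorithm).

-- ===== PORT A =====
def solution (A : List Int) : Int :=
  let N : Int := A.length
  match PySem.List.pyGet? A 0 with
  | none => 0  -- A[0] raises IndexError on []; excluded by Pre_solution
  | some a0 =>
    let st := (PySem.List.pyRange 1 (N - 1)).foldl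
      (fun (s : Int × Int × Int) i =>
        let l := s.1 + PySem.List.pyGetD A i 0
        let r := s.2.1 - PySem.List.pyGetD A i 0
        let c := |l - r|
        (l, r, if s.2.2 > c then c else s.2.2))
      (a0, A.sum - a0, |a0 - (A.sum - a0)|)
    st.2.2

-- ===== PORT B =====
-- the `while lo < hi` binary-search loop of Source B (hand-ported step for step; the Nat fuel
-- only makes the loop total — it is hi - lo at entry and hi - lo shrinks by ≥ 1 each turn)
def bsearchAux : Nat → List Int → Int → Int → Int → Int
  | 0, _, _, lo, _ => lo
  | fuel + 1, P, T, lo, hi =>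
    if lo < hi then
      let mid := PySem.Int.floordiv (lo + hi) 2
      if 2 * PySem.List.pyGetD P mid 0 < T then bsearchAux fuel P T (mid + 1) hi
      else bsearchAux fuel P T lo mid
    else lo

def bsearch (P : List Int) (T lo hi : Int) : Int :=
  bsearchAux (hi - lo).toNat P T lo hi

def solution_alt (A : List Int) : Int :=
  let total := A.sum
  let prefixes :=
    ((PySem.List.slice A none (some (-1))).foldl
      (fun (s : Int × List Int) x => (s.1 + x, s.2 ++ [s.1 + x])) (0, [])).2
  let P := PySem.List.sorted prefixes (fun y => y) false
  let lo := bsearch P total 0 (PySem.List.len P)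
  let candidates := PySem.List.slice P (some (max (lo - 1) 0)) (some (lo + 1))
  match PySem.List.min? (candidates.map (fun p => |2 * p - total|)) (fun y => y) with
  | some m => m
  | none => 0  -- min() of an empty sequence raises ValueError; excluded by Pre_solution

-- ===== PRECONDITION & SPEC =====
-- Pre_ excludes lists with fewer than two elements, where no real split exists: A returns the
-- accidental unconditional-first-split value |A[0]| on a singleton (and raises IndexError on []),
-- while B's min over the empty candidate set raises ValueError.
def Pre_solution (A : List Int) : Prop := 2 ≤ A.length
instance (A : List Int) : Decidable (Pre_solution A) := by unfold Pre_solution; infer_instance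
def pvWitness_solution : List Int := [3, 1, 2, 4, 3]

def Spec_solution (A : List Int) (out : Int) : Prop := out = solution_alt A
instance (A : List Int) (out : Int) : Decidable (Spec_solution A out) := by unfold Spec_solution; infer_instance

-- ===== CLAIM (what is proved, stated in full; the proofs are below) =====
def Claim_equal_solution : Prop := ∀ (A : List Int), Dom_solution A → Pre_solution A → Spec_solution A (solution A)

-- ===== LEMMAS AND PROOFS =====

/-- The prefix sums of `xs` starting from accumulator `c`. -/
def prefList (c : Int) : List Int → List Int
  | [] => []
  | x :: t => (c + x) :: prefList (c + x) t

theorem prefFold (xs : List Int) (c : Int) (acc : List Int) :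
    xs.foldl (fun (s : Int × List Int) x => (s.1 + x, s.2 ++ [s.1 + x])) (c, acc)
      = (c + xs.sum, acc ++ prefList c xs) := by
  induction xs generalizing c acc with
  | nil => simp [prefList]
  | cons x t ih =>
    simp only [List.foldl_cons, prefList, ih (c + x) (acc ++ [c + x]), List.sum_cons,
      Prod.mk.injEq]
    exact ⟨by ring, by simp⟩

theorem core (T : Int) (xs : List Int) (l d : Int) :
    (xs.foldl
        (fun (s : Int × Int × Int) x =>
          (s.1 + x, s.2.1 - x,
            if s.2.2 > |s.1 + x - (s.2.1 - x)| then |s.1 + x - (s.2.1 - x)| else s.2.2))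
        (l, T - l, d)).2.2
      = ((prefList l xs).map (fun p => |2 * p - T|)).foldl min d := by
  induction xs generalizing l d with
  | nil => simp [prefList]
  | cons x t ih =>
    simp only [List.foldl_cons, prefList, List.map_cons]
    have h1 : T - l - x = T - (l + x) := by ring
    rw [h1]
    have h2 : |l + x - (T - (l + x))| = |2 * (l + x) - T| := by congr 1; ring
    rw [h2]
    have h3 : (if d > |2 * (l + x) - T| then |2 * (l + x) - T| else d)
        = min d |2 * (l + x) - T| := by
      rcases le_total d |2 * (l + x) - T| with h | h
      · rw [if_neg (not_lt.mpr h), min_eq_left h]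
      · rw [min_eq_right h]
        split_ifs with hh
        · rfl
        · exact le_antisymm (not_lt.mp hh) h
    rw [h3]
    exact ih (l + x) _

-- the element fetched by index `i ∈ range(1, N-1)` is an element of `A.dropLast`
theorem getD_dropLast (A : List Int) (i : Int)
    (hi : 1 ≤ i ∧ i < (A.dropLast.length : Int)) :
    PySem.List.pyGetD A i 0 = PySem.List.pyGetD A.dropLast i 0 := by
  obtain ⟨h1, h2⟩ := hi
  have hlen : A.dropLast.length = A.length - 1 := List.length_dropLast
  have hiN : i.toNat < A.dropLast.length := by omega
  rw [PySem.List.pyGetD_eq_getElem A 0 (by omega) (by omega),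
      PySem.List.pyGetD_eq_getElem A.dropLast 0 (by omega) h2]
  exact (List.getElem_dropLast hiN).symm

theorem solution_eq_min (a0 : Int) (t : List Int) :
    solution (a0 :: t)
      = ((prefList a0 ((a0 :: t).dropLast.drop 1)).map
          (fun p => |2 * p - (a0 :: t).sum|)).foldl min |2 * a0 - (a0 :: t).sum| := by
  have hget : PySem.List.pyGet? (a0 :: t) 0 = some a0 := by
    simp [PySem.List.pyGet?, PySem.List.pyIdx?]
  have hN : ((a0 :: t).length : Int) - 1 = PySem.List.len (a0 :: t).dropLast := by
    simp [PySem.List.len, List.length_dropLast]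
  unfold solution
  rw [hget]
  simp only [hN]
  rw [PySem.List.foldl_congr_mem
      (PySem.List.pyRange 1 (PySem.List.len (a0 :: t).dropLast))
      (fun (s : Int × Int × Int) i =>
        (s.1 + PySem.List.pyGetD (a0 :: t) i 0, s.2.1 - PySem.List.pyGetD (a0 :: t) i 0,
          if s.2.2 > |s.1 + PySem.List.pyGetD (a0 :: t) i 0 - (s.2.1 - PySem.List.pyGetD (a0 :: t) i 0)|
          then |s.1 + PySem.List.pyGetD (a0 :: t) i 0 - (s.2.1 - PySem.List.pyGetD (a0 :: t) i 0)|
          else s.2.2))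
      (fun (s : Int × Int × Int) i =>
        (s.1 + PySem.List.pyGetD (a0 :: t).dropLast i 0, s.2.1 - PySem.List.pyGetD (a0 :: t).dropLast i 0,
          if s.2.2 > |s.1 + PySem.List.pyGetD (a0 :: t).dropLast i 0 - (s.2.1 - PySem.List.pyGetD (a0 :: t).dropLast i 0)|
          then |s.1 + PySem.List.pyGetD (a0 :: t).dropLast i 0 - (s.2.1 - PySem.List.pyGetD (a0 :: t).dropLast i 0)|
          else s.2.2))
      (a0, (a0 :: t).sum - a0, |a0 - ((a0 :: t).sum - a0)|)
      (by
        intro acc i hi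
        rw [PySem.List.mem_pyRange_one] at hi
        simp only [getD_dropLast (a0 :: t) i (by simpa [PySem.List.len] using hi)])]
  rw [PySem.List.foldl_pyRange_pyGetD (a0 :: t).dropLast 0
      (fun (s : Int × Int × Int) v =>
        (s.1 + v, s.2.1 - v,
          if s.2.2 > |s.1 + v - (s.2.1 - v)| then |s.1 + v - (s.2.1 - v)| else s.2.2))
      (a0, (a0 :: t).sum - a0, |a0 - ((a0 :: t).sum - a0)|)
      (by norm_num : (0 : Int) ≤ 1)]
  rw [core ((a0 :: t).sum) ((a0 :: t).dropLast.drop (1 : Int).toNat) a0]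
  have hd : |a0 - ((a0 :: t).sum - a0)| = |2 * a0 - (a0 :: t).sum| := by congr 1; ring
  rw [hd]
  rfl

theorem bsearchAux_succ (n : Nat) (P : List Int) (T lo hi : Int) :
    bsearchAux (n + 1) P T lo hi =
      if lo < hi then
        (if 2 * PySem.List.pyGetD P (PySem.Int.floordiv (lo + hi) 2) 0 < T then
          bsearchAux n P T (PySem.Int.floordiv (lo + hi) 2 + 1) hi
        else bsearchAux n P T lo (PySem.Int.floordiv (lo + hi) 2))
      else lo := rfl

-- correctness of the binary-search loop: it returns the leftmost index r with T ≤ 2*P[r]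
theorem bsearch_spec (P : List Int) (T : Int)
    (hmono : ∀ p q : Nat, p ≤ q → q < P.length → P.getD p 0 ≤ P.getD q 0)
    (lo hi : Int) (h0 : 0 ≤ lo) (h1 : lo ≤ hi) (h2 : hi ≤ (P.length : Int))
    (hlo : ∀ j : Nat, (j : Int) < lo → 2 * P.getD j 0 < T)
    (hhi : ∀ j : Nat, hi ≤ (j : Int) → j < P.length → T ≤ 2 * P.getD j 0) :
    lo ≤ bsearch P T lo hi ∧ bsearch P T lo hi ≤ hi ∧
    (∀ j : Nat, (j : Int) < bsearch P T lo hi → 2 * P.getD j 0 < T) ∧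
    (∀ j : Nat, bsearch P T lo hi ≤ (j : Int) → j < P.length → T ≤ 2 * P.getD j 0) := by
  have haux : ∀ (fuel : Nat) (lo hi : Int), (hi - lo).toNat ≤ fuel → 0 ≤ lo → lo ≤ hi →
      hi ≤ (P.length : Int) →
      (∀ j : Nat, (j : Int) < lo → 2 * P.getD j 0 < T) →
      (∀ j : Nat, hi ≤ (j : Int) → j < P.length → T ≤ 2 * P.getD j 0) →
      lo ≤ bsearchAux fuel P T lo hi ∧ bsearchAux fuel P T lo hi ≤ hi ∧
      (∀ j : Nat, (j : Int) < bsearchAux fuel P T lo hi → 2 * P.getD j 0 < T) ∧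
      (∀ j : Nat, bsearchAux fuel P T lo hi ≤ (j : Int) → j < P.length → T ≤ 2 * P.getD j 0) := by
    intro fuel
    induction fuel with
    | zero =>
      intro lo hi hf h0 h1 h2 hlo hhi
      simp only [bsearchAux]
      exact ⟨le_refl _, h1, hlo, fun j hj hjl => hhi j (by omega) hjl⟩
    | succ n ih =>
      intro lo hi hf h0 h1 h2 hlo hhi
      by_cases hlh : lo < hi
      · rw [bsearchAux_succ, if_pos hlh]
        have hmb : lo ≤ PySem.Int.floordiv (lo + hi) 2 ∧
            PySem.Int.floordiv (lo + hi) 2 < hi := by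
          simp only [PySem.Int.floordiv, Int.fdiv_eq_ediv]; omega
        set mid := PySem.Int.floordiv (lo + hi) 2 with hmiddef
        have hmget : PySem.List.pyGetD P mid 0 = P.getD mid.toNat 0 := by
          rw [PySem.List.pyGetD_eq_getElem P 0 (by omega) (by omega),
            List.getD_eq_getElem _ _ (by omega)]
        by_cases hc : 2 * PySem.List.pyGetD P mid 0 < T
        · rw [if_pos hc]
          rw [hmget] at hc
          have := ih (mid + 1) hi (by omega) (by omega) (by omega) h2
            (by
              intro j hj
              by_cases hjlo : (j : Int) < lo
              · exact hlo j hjlo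
              · have hjm : (j : Nat) ≤ mid.toNat := by omega
                have := hmono j mid.toNat hjm (by omega)
                omega)
            hhi
          exact ⟨by omega, by omega, this.2.2.1, this.2.2.2⟩
        · rw [if_neg hc]
          rw [hmget] at hc
          have := ih lo mid (by omega) h0 (by omega) (by omega) hlo
            (by
              intro j hj hjl
              have := hmono mid.toNat j (by omega) hjl
              omega)
          exact ⟨this.1, by omega, this.2.2.1, this.2.2.2⟩
      · rw [bsearchAux_succ, if_neg hlh]
        exact ⟨le_refl _, h1, hlo, fun j hj hjl => hhi j (by omega) hjl⟩
  exact haux (hi - lo).toNat lo hi (le_refl _) h0 h1 h2 hlo hhi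

-- the two candidates around the split point dominate every element of P
theorem cands_dom (P : List Int) (T : Int) (hP : P ≠ [])
    (hmono : ∀ p q : Nat, p ≤ q → q < P.length → P.getD p 0 ≤ P.getD q 0)
    (r : Int) (hr0 : 0 ≤ r) (hr1 : r ≤ (P.length : Int))
    (hlt : ∀ j : Nat, (j : Int) < r → 2 * P.getD j 0 < T)
    (hge : ∀ j : Nat, r ≤ (j : Int) → j < P.length → T ≤ 2 * P.getD j 0) :
    PySem.List.slice P (some (max (r - 1) 0)) (some (r + 1)) ≠ [] ∧
    (∀ c ∈ PySem.List.slice P (some (max (r - 1) 0)) (some (r + 1)), c ∈ P) ∧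
    ∃ c ∈ PySem.List.slice P (some (max (r - 1) 0)) (some (r + 1)),
      ∀ x ∈ P, |2 * c - T| ≤ |2 * x - T| := by
  have hn : 0 < P.length := List.length_pos_iff.mpr hP
  have hsl := PySem.List.slice_toNat P (a := max (r - 1) 0) (b := r + 1)
    (le_max_right _ _) (by omega)
  by_cases hr : 1 ≤ r
  · -- candidates are P[r-1] (and P[r] if it exists)
    have hkn : (r - 1).toNat < P.length := by omega
    have hdk : P.drop (r - 1).toNat = P.getD (r - 1).toNat 0 :: P.drop ((r - 1).toNat + 1) := by
      rw [List.drop_eq_getElem_cons hkn, List.getD_eq_getElem _ _ hkn]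
    have hmax : (max (r - 1) 0).toNat = (r - 1).toNat := by omega
    have htwo : (r + 1).toNat - (r - 1).toNat = 2 := by omega
    by_cases hlast : (r - 1).toNat + 1 < P.length
    · -- two candidates
      have hdk1 : P.drop ((r - 1).toNat + 1)
          = P.getD ((r - 1).toNat + 1) 0 :: P.drop ((r - 1).toNat + 2) := by
        rw [List.drop_eq_getElem_cons hlast, List.getD_eq_getElem _ _ hlast]
      have hcands : PySem.List.slice P (some (max (r - 1) 0)) (some (r + 1))
          = [P.getD (r - 1).toNat 0, P.getD ((r - 1).toNat + 1) 0] := by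
        rw [hsl, hmax, htwo, hdk, hdk1]
        rfl
      rw [hcands]
      refine ⟨by simp, ?_, ?_⟩
      · intro c hc
        simp only [List.mem_cons, List.not_mem_nil, or_false] at hc
        rcases hc with rfl | rfl
        · rw [List.getD_eq_getElem _ _ hkn]; exact List.getElem_mem _
        · rw [List.getD_eq_getElem _ _ hlast]; exact List.getElem_mem _
      · set c := if |2 * P.getD (r - 1).toNat 0 - T| ≤ |2 * P.getD ((r - 1).toNat + 1) 0 - T|
            then P.getD (r - 1).toNat 0 else P.getD ((r - 1).toNat + 1) 0 with hc
        have hcle : |2 * c - T| ≤ |2 * P.getD (r - 1).toNat 0 - T| ∧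
            |2 * c - T| ≤ |2 * P.getD ((r - 1).toNat + 1) 0 - T| := by
          rw [hc]; split_ifs with h
          · exact ⟨le_refl _, h⟩
          · exact ⟨(not_le.mp h).le, le_refl _⟩
        refine ⟨c, by rw [hc]; split_ifs <;> simp, ?_⟩
        intro x hx
        obtain ⟨j, hj, rfl⟩ := List.mem_iff_getElem.mp hx
        rw [← List.getD_eq_getElem P 0 hj]
        by_cases hjk : j ≤ (r - 1).toNat
        · have ha1 : 2 * P.getD j 0 < T := hlt j (by omega)
          have ha2 : 2 * P.getD (r - 1).toNat 0 < T := hlt (r - 1).toNat (by omega)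
          have ha3 : P.getD j 0 ≤ P.getD (r - 1).toNat 0 := hmono j _ hjk hkn
          refine hcle.1.trans ?_
          rw [abs_of_nonpos (by omega), abs_of_nonpos (by omega)]; omega
        · have ha1 : T ≤ 2 * P.getD j 0 := hge j (by omega) hj
          have ha2 : T ≤ 2 * P.getD ((r - 1).toNat + 1) 0 := hge _ (by omega) hlast
          have ha3 : P.getD ((r - 1).toNat + 1) 0 ≤ P.getD j 0 := hmono _ j (by omega) hj
          refine hcle.2.trans ?_
          rw [abs_of_nonneg (by omega), abs_of_nonneg (by omega)]; omega
    · -- r = length P: single candidate, the last element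
      have hcands : PySem.List.slice P (some (max (r - 1) 0)) (some (r + 1))
          = [P.getD (r - 1).toNat 0] := by
        rw [hsl, hmax, htwo, hdk, List.drop_of_length_le (by omega)]
        rfl
      rw [hcands]
      refine ⟨by simp, ?_, ?_⟩
      · intro c hc
        simp only [List.mem_cons, List.not_mem_nil, or_false] at hc
        subst hc
        rw [List.getD_eq_getElem _ _ hkn]; exact List.getElem_mem _
      · refine ⟨P.getD (r - 1).toNat 0, List.mem_singleton.mpr rfl, ?_⟩
        intro x hx
        obtain ⟨j, hj, rfl⟩ := List.mem_iff_getElem.mp hx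
        rw [← List.getD_eq_getElem P 0 hj]
        have ha1 : 2 * P.getD j 0 < T := hlt j (by omega)
        have ha2 : 2 * P.getD (r - 1).toNat 0 < T := hlt (r - 1).toNat (by omega)
        have ha3 : P.getD j 0 ≤ P.getD (r - 1).toNat 0 := hmono j _ (by omega) hkn
        rw [abs_of_nonpos (by omega), abs_of_nonpos (by omega)]; omega
  · -- r = 0: single candidate, the first element
    have hr0' : r = 0 := by omega
    subst hr0'
    have hcands : PySem.List.slice P (some (max (0 - 1) 0)) (some (0 + 1))
        = [P.getD 0 0] := by
      rw [hsl]
      have h1 : (max ((0 : Int) - 1) 0).toNat = 0 := by omega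
      rw [h1, List.drop_zero]
      cases P with
      | nil => exact absurd rfl hP
      | cons p ps => simp
    rw [hcands]
    refine ⟨by simp, ?_, ?_⟩
    · intro c hc
      simp only [List.mem_cons, List.not_mem_nil, or_false] at hc
      subst hc
      rw [List.getD_eq_getElem _ _ hn]; exact List.getElem_mem _
    · refine ⟨P.getD 0 0, List.mem_singleton.mpr rfl, ?_⟩
      intro x hx
      obtain ⟨j, hj, rfl⟩ := List.mem_iff_getElem.mp hx
      rw [← List.getD_eq_getElem P 0 hj]
      have ha1 : T ≤ 2 * P.getD j 0 := hge j (by omega) hj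
      have ha2 : T ≤ 2 * P.getD 0 0 := hge 0 (by omega) hn
      have ha3 : P.getD 0 0 ≤ P.getD j 0 := hmono 0 j (by omega) hj
      rw [abs_of_nonneg (by omega), abs_of_nonneg (by omega)]; omega

-- min (no key) of a dominating nonempty sublist equals min of the whole list
theorem min?_eq_of (u v : List Int) (hne : u ≠ []) (hsub : ∀ x ∈ u, x ∈ v)
    (hdom : ∃ c ∈ u, ∀ y ∈ v, c ≤ y) :
    PySem.List.min? u (fun y => y) = PySem.List.min? v (fun y => y) := by
  obtain ⟨a, u', rfl⟩ := List.exists_cons_of_ne_nil hne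
  have hv : v ≠ [] := by
    intro h; subst h; simpa using hsub a (by simp)
  obtain ⟨b, v', rfl⟩ := List.exists_cons_of_ne_nil hv
  obtain ⟨mu, hmu⟩ : ∃ mu, PySem.List.min? (a :: u') (fun y => y) = some mu :=
    ⟨_, PySem.List.min?_id_cons a u'⟩
  obtain ⟨mv, hmv⟩ : ∃ mv, PySem.List.min? (b :: v') (fun y => y) = some mv :=
    ⟨_, PySem.List.min?_id_cons b v'⟩
  rw [hmu, hmv]
  obtain ⟨c, hcu, hcdom⟩ := hdom
  have h1 : mv ≤ mu := PySem.List.min?_isMin hmv _ (hsub _ (PySem.List.min?_mem hmu))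
  have h2 : mu ≤ c := PySem.List.min?_isMin hmu _ hcu
  have h3 : c ≤ mv := hcdom _ (PySem.List.min?_mem hmv)
  exact congrArg some (le_antisymm (h2.trans h3) h1)

-- ===== VERDICT (by name: the statement is the Claim_ definition above) =====
theorem solution_spec : Claim_equal_solution := by
  intro A _ hpre
  unfold Spec_solution
  match A, hpre with
  | a0 :: b :: t, _ =>
    set T := (a0 :: b :: t).sum with hT
    set f : Int → Int := fun p => |2 * p - T| with hf
    set L : List Int := prefList 0 (a0 :: b :: t).dropLast with hLdef
    have hDL : (a0 :: b :: t).dropLast = a0 :: (b :: t).dropLast := List.dropLast_cons₂ ..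
    have hL : L = a0 :: prefList a0 (b :: t).dropLast := by
      rw [hLdef, hDL]; simp [prefList]
    have hLne : L ≠ [] := by rw [hL]; simp
    -- A's value is the minimum of f over the prefix-sum list L
    have hA : PySem.List.min? (L.map f) (fun y => y) = some (solution (a0 :: b :: t)) := by
      rw [solution_eq_min a0 (b :: t)]
      have hdrop : (a0 :: b :: t).dropLast.drop 1 = (b :: t).dropLast := by
        rw [hDL]; rfl
      rw [hdrop, hL, List.map_cons]
      exact PySem.List.min?_id_cons _ _
    -- B's sorted table
    set P : List Int := PySem.List.sorted L (fun y => y) false with hPdef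
    have hPne : P ≠ [] := by
      rw [hPdef]
      simpa [PySem.List.sorted_eq_nil_iff] using hLne
    have hmemP : ∀ x, x ∈ P ↔ x ∈ L := by
      intro x; rw [hPdef]; exact PySem.List.mem_sorted L _ false x
    have hmono : ∀ p q : Nat, p ≤ q → q < P.length → P.getD p 0 ≤ P.getD q 0 := by
      intro p q hpq hq
      rw [List.getD_eq_getElem _ _ (lt_of_le_of_lt hpq hq), List.getD_eq_getElem _ _ hq]
      exact PySem.List.sorted_id_getElem_mono L hpq (by simpa [hPdef] using hq)
    -- binary-search result
    have hbs := bsearch_spec P T hmono 0 (P.length : Int) (le_refl _) (by positivity)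
      (le_refl _) (by intro j hj; omega) (by intro j hj hjl; omega)
    set r : Int := bsearch P T 0 (P.length : Int) with hrdef
    have hcd := cands_dom P T hPne hmono r hbs.1 hbs.2.1 hbs.2.2.1 hbs.2.2.2
    obtain ⟨hcne, hcsub, c, hc, hcdom⟩ := hcd
    -- the candidate minimum equals the full minimum
    have hmin : PySem.List.min?
        ((PySem.List.slice P (some (max (r - 1) 0)) (some (r + 1))).map f) (fun y => y)
        = some (solution (a0 :: b :: t)) := by
      rw [← hA]
      apply min?_eq_of
      · simpa using hcne
      · intro x hx
        obtain ⟨p, hp, rfl⟩ := List.mem_map.mp hx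
        exact List.mem_map_of_mem ((hmemP p).mp (hcsub p hp))
      · refine ⟨f c, List.mem_map_of_mem hc, ?_⟩
        intro y hy
        obtain ⟨x, hx, rfl⟩ := List.mem_map.mp hy
        exact hcdom x ((hmemP x).mpr hx)
    -- unfold B and close
    have hpref : ((PySem.List.slice (a0 :: b :: t) none (some (-1))).foldl
        (fun (s : Int × List Int) x => (s.1 + x, s.2 ++ [s.1 + x])) (0, [])).2 = L := by
      rw [PySem.List.slice_to_neg_one, prefFold, hLdef]
      simp
    simp only [solution_alt, hpref]
    rw [show PySem.List.len (PySem.List.sorted L (fun y => y) false) = (P.length : Int) by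
      simp [hPdef]]
    rw [← hT, ← hPdef, ← hf, ← hrdef, hmin]
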